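-- pv_equiv track=rewrite | github.com/BFFV/BasicComputer | assembler/read_asm.py | delete_white_spaces
-- ===== SOURCE A (Python) =====
-- def delete_white_spaces(line):
--     separated_by_spaces = line.split(' ')
--     final_line = []
--     for i in separated_by_spaces:
--         if i != '':
--             final_line.append(i)
--     if not final_line:
--         return ''
--     elif len(final_line) == 1:
--         return final_line[0]
--     return final_line[0] + ' ' + ''.join(final_line[1:])
-- ===== SOURCE B (Python) =====
-- def delete_white_spaces(line):
--     # Single left-to-right pass; stage 0 = leading spaces, 1 = first token,
--     # 2 = gap after first token (separator not yet emitted), 3 = tail (spaces dropped).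
--     out = []
--     stage = 0
--     for c in line:
--         if c == ' ':
--             if stage == 1:
--                 stage = 2
--         else:
--             if stage == 0:
--                 stage = 1
--             elif stage == 2:
--                 out.append(' ')
--                 stage = 3
--             out.append(c)
--     return ''.join(out)
-- ===== Notes on version B (the rewrite author's own statement) =====
-- stated objective: alternative
-- what changed: Replaced the space-split + filter + join assembly with a single left-to-right character pass driven by a 4-state machine (leading spaces / first token / gap / tail) that emits the output directly.
import Mathlib
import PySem

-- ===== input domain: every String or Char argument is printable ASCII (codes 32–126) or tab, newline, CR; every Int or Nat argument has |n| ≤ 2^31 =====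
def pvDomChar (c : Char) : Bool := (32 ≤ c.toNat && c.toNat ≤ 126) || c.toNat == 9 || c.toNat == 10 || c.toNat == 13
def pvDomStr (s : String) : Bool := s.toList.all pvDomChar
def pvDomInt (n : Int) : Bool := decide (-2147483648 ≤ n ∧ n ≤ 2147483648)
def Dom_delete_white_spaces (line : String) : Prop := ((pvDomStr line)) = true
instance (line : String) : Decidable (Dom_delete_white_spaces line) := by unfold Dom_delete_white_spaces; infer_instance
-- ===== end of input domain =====

-- B replaces the space-split + filter + join assembly with a single-pass 4-state character scan (alternative decomposition, same O(n) cost).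

-- ===== PORT A =====
-- tokens are kept as List Char (Python str pieces); '+' on str = List.append, ''.join = PySem.Chars.join []
def delete_white_spaces (line : String) : String :=
  let separated_by_spaces := PySem.Chars.splitOn line.toList [' ']
  let final_line := separated_by_spaces.foldl (fun acc i => if i ≠ [] then acc ++ [i] else acc) []
  if final_line = [] then ""
  else if final_line.length = 1 then String.mk final_line[0]!
  else String.mk (final_line[0]! ++ [' '] ++ PySem.Chars.join [] (final_line.drop 1))

-- ===== PORT B =====
-- one fold over the characters; state = (output so far, stage 0/1/2/3), exactly Source B's loop
def pvStepB (st : List Char × Nat) (c : Char) : List Char × Nat :=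
  if c = ' ' then (if st.2 = 1 then (st.1, 2) else st)
  else if st.2 = 0 then (st.1 ++ [c], 1)
  else if st.2 = 2 then (st.1 ++ [' ', c], 3)
  else (st.1 ++ [c], st.2)

def delete_white_spaces_alt (line : String) : String :=
  String.mk (line.toList.foldl pvStepB ([], 0)).1

-- ===== PRECONDITION & SPEC =====
def Spec_delete_white_spaces (line : String) (out : String) : Prop := out = delete_white_spaces_alt line
instance (line : String) (out : String) : Decidable (Spec_delete_white_spaces line out) := by unfold Spec_delete_white_spaces; infer_instance

-- ===== CLAIM (what is proved, stated in full; the proofs are below) =====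
def Claim_equal_delete_white_spaces : Prop := ∀ (line : String), Dom_delete_white_spaces line → Spec_delete_white_spaces line (delete_white_spaces line)

-- ===== LEMMAS AND PROOFS =====

-- proof-side: a structural model of splitOn on the single-char separator ' '
def pvSplit : List Char → List (List Char)
  | [] => [[]]
  | c :: t => if c = ' ' then [] :: pvSplit t
              else match pvSplit t with
                   | [] => [[c]]
                   | p :: ps => (c :: p) :: ps

def pvPrependL (x : List Char) : List (List Char) → List (List Char)
  | [] => [x]
  | p :: ps => (x ++ p) :: ps

lemma pvSplit_ne_nil (l : List Char) : pvSplit l ≠ [] := by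
  cases l with
  | nil => simp [pvSplit]
  | cons c t =>
    simp only [pvSplit]
    split
    · simp
    · rcases h : pvSplit t with _ | ⟨p, ps⟩ <;> simp

lemma pv_go_eq : ∀ (l : List Char) (fuel : Nat) (cur : List Char) (acc : List (List Char)),
    l.length < fuel →
    PySem.Chars.splitOn.go [' '] fuel l cur acc = acc.reverse ++ pvPrependL cur.reverse (pvSplit l) := by
  intro l
  induction l with
  | nil =>
    intro fuel cur acc h
    match fuel with
    | fuel + 1 =>
      simp [PySem.Chars.splitOn.go, pvSplit, pvPrependL]
  | cons c t ih =>
    intro fuel cur acc h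
    match fuel with
    | fuel + 1 =>
      rw [PySem.Chars.splitOn.go]
      by_cases hc : c = ' '
      · subst hc
        have hpre : [' '].isPrefixOf (' ' :: t) = true := by simp [List.isPrefixOf]
        rw [if_pos hpre]
        rw [show List.drop [' '].length (' ' :: t) = t from rfl]
        simp only [List.length_cons] at h
        rw [ih fuel [] (cur.reverse :: acc) (by omega)]
        rcases hs : pvSplit t with _ | ⟨p, ps⟩
        · exact absurd hs (pvSplit_ne_nil t)
        · have e1 : pvSplit (' ' :: t) = [] :: pvSplit t := by rw [pvSplit, if_pos rfl]
          simp [e1, pvPrependL, hs]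
      · have hpre : [' '].isPrefixOf (c :: t) = false := by
          simp only [List.isPrefixOf, Bool.and_eq_false_iff]
          left
          rw [beq_eq_false_iff_ne]
          intro hh
          exact hc hh.symm
        rw [if_neg (by simp [hpre])]
        simp only [List.length_cons] at h
        rw [ih fuel (c :: cur) acc (by omega)]
        rcases hs : pvSplit t with _ | ⟨p, ps⟩
        · exact absurd hs (pvSplit_ne_nil t)
        · have e1 : pvSplit (c :: t) = (c :: p) :: ps := by
            rw [pvSplit, if_neg hc, hs]
          simp [e1, pvPrependL, hs]

lemma pv_splitOn_eq (l : List Char) : PySem.Chars.splitOn l [' '] = pvSplit l := by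
  rw [PySem.Chars.splitOn, pv_go_eq l (l.length + 1) [] [] (by omega)]
  rcases hs : pvSplit l with _ | ⟨p, ps⟩
  · exact absurd hs (pvSplit_ne_nil l)
  · simp [pvPrependL]

-- the filter fold
lemma pv_foldl_filter (xs : List (List Char)) (acc : List (List Char)) :
    xs.foldl (fun acc i => if i ≠ [] then acc ++ [i] else acc) acc
      = acc ++ xs.filter (fun i => i ≠ []) := by
  induction xs generalizing acc with
  | nil => simp
  | cons x t ih =>
    rw [List.foldl_cons, List.filter_cons]
    by_cases hx : x = []
    · rw [if_neg (by simp [hx]), if_neg (by simp [hx]), ih]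
    · rw [if_pos (by simp [hx]), if_pos (by simp [hx]), ih, List.append_assoc,
          List.singleton_append]

-- the nonempty tokens of l (maximal runs of non-space characters)
def pvWords : List Char → List (List Char)
  | [] => []
  | c :: t =>
    if c = ' ' then pvWords t
    else (c :: t.takeWhile (· ≠ ' ')) :: pvWords (t.dropWhile (· ≠ ' '))
termination_by l => l.length
decreasing_by
  · simp
  · have := List.length_dropWhile_le (p := fun x => decide (x ≠ ' ')) t
    simp at this ⊢; omega

-- structure of pvSplit on a non-space head
lemma pvSplit_cons_nonspace : ∀ (t : List Char) (c : Char), ¬ c = ' ' →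
    pvSplit (c :: t) = (c :: t.takeWhile (· ≠ ' ')) ::
      (match t.dropWhile (· ≠ ' ') with
       | [] => ([] : List (List Char))
       | _ :: u => pvSplit u) := by
  intro t
  induction t with
  | nil =>
    intro c hc
    rw [pvSplit, if_neg hc]
    simp [pvSplit]
  | cons d u ihd =>
    intro c hc
    by_cases hd : d = ' '
    · subst hd
      rw [pvSplit, if_neg hc, pvSplit, if_pos rfl]
      simp [List.takeWhile_cons, List.dropWhile_cons]
    · rw [pvSplit, if_neg hc, ihd d hd]
      simp [List.takeWhile_cons, List.dropWhile_cons, hd]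

lemma pv_toks_eq_words (l : List Char) :
    (pvSplit l).filter (fun i => i ≠ []) = pvWords l := by
  induction hn : l.length using Nat.strong_induction_on generalizing l with
  | _ n ih =>
    cases l with
    | nil => simp [pvSplit, pvWords]
    | cons c t =>
      simp only [List.length_cons] at hn
      by_cases hc : c = ' '
      · subst hc
        have e1 : pvSplit (' ' :: t) = [] :: pvSplit t := by rw [pvSplit, if_pos rfl]
        have e2 : pvWords (' ' :: t) = pvWords t := by rw [pvWords, if_pos rfl]
        rw [e1, e2, List.filter_cons, if_neg (by simp)]
        exact ih t.length (by omega) t rfl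
      · have e2 : pvWords (c :: t)
            = (c :: t.takeWhile (· ≠ ' ')) :: pvWords (t.dropWhile (· ≠ ' ')) := by
          rw [pvWords, if_neg hc]
        rw [pvSplit_cons_nonspace t c hc, e2, List.filter_cons, if_pos (by simp)]
        congr 1
        rcases hd : t.dropWhile (· ≠ ' ') with _ | ⟨d, u⟩
        · simp [pvWords]
        · have hdsp : d = ' ' := by
            have h0 := List.head?_dropWhile_not (p := fun x => decide (x ≠ ' ')) t
            rw [hd] at h0
            simpa using h0
          have hlen : u.length < n := by
            have h1 : (t.dropWhile (· ≠ ' ')).length ≤ t.length :=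
              List.length_dropWhile_le _ _
            rw [hd] at h1
            simp only [List.length_cons] at h1
            omega
          have e3 : pvWords (d :: u) = pvWords u := by rw [pvWords, if_pos hdsp]
          rw [e3]
          exact ih u.length hlen u rfl

-- B-side closed forms per stage
def pvB3 (l : List Char) : List Char := l.filter (· ≠ ' ')
def pvB2 (l : List Char) : List Char := if pvB3 l = [] then [] else ' ' :: pvB3 l
def pvB1 (l : List Char) : List Char := l.takeWhile (· ≠ ' ') ++ pvB2 (l.dropWhile (· ≠ ' '))

lemma pv_fold3 (l : List Char) (out : List Char) :
    (l.foldl pvStepB (out, 3)).1 = out ++ pvB3 l := by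
  induction l generalizing out with
  | nil => simp [pvB3]
  | cons c t ih =>
    by_cases hc : c = ' ' <;> simp [pvStepB, hc, ih, pvB3, List.filter_cons]

lemma pv_fold2 (l : List Char) (out : List Char) :
    (l.foldl pvStepB (out, 2)).1 = out ++ pvB2 l := by
  induction l generalizing out with
  | nil => simp [pvB2, pvB3]
  | cons c t ih =>
    by_cases hc : c = ' '
    · simp [pvStepB, hc, ih, pvB2, pvB3, List.filter_cons]
    · simp [pvStepB, hc, pv_fold3, pvB2, pvB3, List.filter_cons]

lemma pvB2_cons_space (t : List Char) : pvB2 (' ' :: t) = pvB2 t := by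
  simp [pvB2, pvB3, List.filter_cons]

lemma pv_fold1 (l : List Char) (out : List Char) :
    (l.foldl pvStepB (out, 1)).1 = out ++ pvB1 l := by
  induction l generalizing out with
  | nil => simp [pvB1, pvB2, pvB3]
  | cons c t ih =>
    by_cases hc : c = ' '
    · simp [pvStepB, hc, pv_fold2, pvB1, pvB2_cons_space, List.takeWhile_cons,
            List.dropWhile_cons]
    · simp [pvStepB, hc, ih, pvB1, List.takeWhile_cons, List.dropWhile_cons]

lemma pv_fold0 (l : List Char) (out : List Char) :
    (l.foldl pvStepB (out, 0)).1 = out ++ pvB1 (l.dropWhile (· = ' ')) := by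
  induction l generalizing out with
  | nil => simp [pvB1, pvB2, pvB3]
  | cons c t ih =>
    by_cases hc : c = ' '
    · simp [pvStepB, hc, ih, List.dropWhile_cons]
    · simp [pvStepB, hc, pv_fold1, List.dropWhile_cons, pvB1,
            List.takeWhile_cons, List.dropWhile_cons]

-- words / filter bridges
lemma pv_words_flatten (l : List Char) :
    (pvWords l).flatten = l.filter (· ≠ ' ') := by
  induction hn : l.length using Nat.strong_induction_on generalizing l with
  | _ n ih =>
    cases l with
    | nil => simp [pvWords]
    | cons c t =>
      simp only [List.length_cons] at hn
      by_cases hc : c = ' '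
      · rw [pvWords, if_pos hc]
        rw [ih t.length (by omega) t rfl]
        simp [List.filter_cons, hc]
      · rw [pvWords, if_neg hc]
        have hlen : (t.dropWhile (· ≠ ' ')).length ≤ t.length :=
          List.length_dropWhile_le _ _
        rw [List.flatten_cons, ih (t.dropWhile (· ≠ ' ')).length (by omega) _ rfl]
        simp only [List.filter_cons, hc]
        simp only [show ((¬ c = ' ') : Bool) = true by simp [hc], if_pos rfl]
        rw [List.cons_append]
        congr 1
        -- takeWhile p t ++ filter p (dropWhile p t) = filter p t  for p = (· ≠ ' ')
        conv_rhs => rw [← List.takeWhile_append_dropWhile (p := fun x => decide (x ≠ ' ')) (l := t)]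
        rw [List.filter_append]
        congr 1
        refine (List.filter_eq_self.mpr ?_).symm
        intro a ha
        exact List.mem_takeWhile_imp (p := fun x => decide (x ≠ ' ')) (l := t) ha

lemma pv_words_nil_iff (l : List Char) :
    pvWords l = [] ↔ l.filter (· ≠ ' ') = [] := by
  constructor
  · intro h
    have := pv_words_flatten l
    rw [h] at this
    simpa using this.symm
  · intro h
    induction l with
    | nil => simp [pvWords]
    | cons c t ih =>
      simp only [List.filter_cons] at h
      by_cases hc : c = ' '
      · rw [pvWords, if_pos hc]
        exact ih (by simpa [hc] using h)
      · exfalso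
        simp [hc] at h

-- dropping leading spaces does not change the words
lemma pv_words_dropWhile (l : List Char) :
    pvWords (l.dropWhile (· = ' ')) = pvWords l := by
  induction l with
  | nil => simp
  | cons c t ih =>
    by_cases hc : c = ' '
    · subst hc
      rw [List.dropWhile_cons_of_pos (by simp), ih, pvWords, if_pos rfl]
    · rw [List.dropWhile_cons_of_neg (by simp [hc])]

-- A's rendering of the token list
def pvRender : List (List Char) → List Char
  | [] => []
  | w :: ws => if ws = [] then w else w ++ ' ' :: ws.flatten

lemma pv_render_eq_B1 (m : List Char) (hm : m.dropWhile (· = ' ') = m) :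
    pvRender (pvWords m) = pvB1 m := by
  cases m with
  | nil => simp [pvWords, pvRender, pvB1, pvB2, pvB3]
  | cons c t =>
    have hc : c ≠ ' ' := by
      intro h
      rw [List.dropWhile_cons] at hm
      simp only [h, decide_true, if_pos rfl] at hm
      have := congrArg List.length hm
      have h2 := List.length_dropWhile_le (p := fun x => decide (x = ' ')) t
      simp at this h2; omega
    rw [pvWords, if_neg hc, pvB1,
        List.takeWhile_cons_of_pos (by simp [hc]),
        List.dropWhile_cons_of_pos (by simp [hc]),
        pvRender]
    by_cases hw : pvWords (t.dropWhile (· ≠ ' ')) = []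
    · rw [if_pos hw]
      have h0 : pvB3 (t.dropWhile (· ≠ ' ')) = [] := by
        rw [pvB3]
        exact (pv_words_nil_iff _).mp hw
      rw [pvB2, if_pos h0]
      simp
    · rw [if_neg hw]
      have h3 : ¬ pvB3 (t.dropWhile (· ≠ ' ')) = [] := by
        rw [pvB3]
        intro h
        exact hw ((pv_words_nil_iff _).mpr h)
      rw [pv_words_flatten, pvB2, if_neg h3, pvB3]

lemma pv_flatten_intersperse (l : List (List Char)) :
    (List.intersperse ([] : List Char) l).flatten = l.flatten := by
  induction l with
  | nil => rfl
  | cons a t ih =>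
    cases t with
    | nil => rfl
    | cons b u => simp_all [List.intersperse]

-- A's port equals the rendering of the words
lemma pvA_eq (line : String) :
    delete_white_spaces line = String.mk (pvRender (pvWords line.toList)) := by
  rw [delete_white_spaces]
  simp only [pv_splitOn_eq, pv_foldl_filter, List.nil_append, pv_toks_eq_words]
  rcases hw : pvWords line.toList with _ | ⟨w, ws⟩
  · simp only [pvRender]; rfl
  · rcases ws with _ | ⟨w2, ws2⟩
    · simp [pvRender]
    · simp only [List.length_cons, pvRender]
      rw [if_neg (by simp), if_neg (by simp), if_neg (by simp)]
      simp [PySem.Chars.join, List.intercalate, pv_flatten_intersperse]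

-- B's port equals the same rendering
lemma pvB_eq (line : String) :
    delete_white_spaces_alt line = String.mk (pvRender (pvWords line.toList)) := by
  rw [delete_white_spaces_alt, pv_fold0]
  rw [← pv_words_dropWhile line.toList]
  rw [pv_render_eq_B1 _ (List.dropWhile_idempotent _ _)]
  simp

-- ===== VERDICT (by name: the statement is the Claim_ definition above) =====
theorem delete_white_spaces_spec : Claim_equal_delete_white_spaces := by
  intro line _
  unfold Spec_delete_white_spaces
  rw [pvA_eq, pvB_eq]
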